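-- pv_equiv track=rewrite | github.com/Miopas/graph_text_classification | graph_construction/encode_doc_words_norm.py | normalize_wc_map
-- ===== SOURCE A (Python) =====
-- def normalize_wc_map(wc_map, metamap_map):
--     new = {}
--     for word, count in wc_map.items():
--         if word not in metamap_map:
--             continue
--         norm = metamap_map[word]
--         if norm not in new:
--             new[norm] = count
--         else:
--             new[norm] += count
--     return new
-- ===== SOURCE B (Python) =====
-- def normalize_wc_map(wc_map, metamap_map):
--     # Staged pipeline: translate, collect distinct norms, then sum per norm.
--     pairs = [(metamap_map[w], c) for w, c in wc_map.items() if w in metamap_map]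
--     norms = list(dict.fromkeys(n for n, _ in pairs))
--     return {n: sum(c for m, c in pairs if m == n) for n in norms}
-- ===== Notes on version B (the rewrite author's own statement) =====
-- stated objective: alternative
-- what changed: Replaces the live dict accumulation with a staged pipeline: build the translated (norm, count) pair list, dedup the norms in first-appearance order, then compute each norm's total by summing a filtered pass over the pairs.
import Mathlib
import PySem

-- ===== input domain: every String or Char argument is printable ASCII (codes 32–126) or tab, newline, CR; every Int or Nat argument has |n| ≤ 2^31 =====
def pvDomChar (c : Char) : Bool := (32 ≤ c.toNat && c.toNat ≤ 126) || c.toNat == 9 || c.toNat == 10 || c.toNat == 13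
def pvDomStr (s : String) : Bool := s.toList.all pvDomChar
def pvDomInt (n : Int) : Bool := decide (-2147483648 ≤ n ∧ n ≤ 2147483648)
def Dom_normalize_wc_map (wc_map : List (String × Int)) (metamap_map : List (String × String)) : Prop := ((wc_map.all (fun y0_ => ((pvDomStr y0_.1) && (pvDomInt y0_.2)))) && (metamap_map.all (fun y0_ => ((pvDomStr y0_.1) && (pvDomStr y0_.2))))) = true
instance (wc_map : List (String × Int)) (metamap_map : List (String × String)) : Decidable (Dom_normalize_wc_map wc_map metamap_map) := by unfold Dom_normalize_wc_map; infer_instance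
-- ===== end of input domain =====

-- B replaces A's live dict accumulation by a staged pipeline (translate, dedup norms, sum each norm); alternative decomposition, same results.

-- ===== PORT A =====
def normalize_wc_map (wc_map : List (String × Int)) (metamap_map : List (String × String)) : List (String × Int) :=
  let m : PySem.Dict String String := PySem.Dict.mk metamap_map
  (wc_map.foldl (fun new q =>
      if m.contains q.1 = false then new
      else
        let norm := m.getD q.1 ""
        if new.contains norm = false then new.insert norm q.2
        else new.insert norm (new.getD norm 0 + q.2))
    PySem.Dict.empty).items

-- ===== PORT B =====
def normalize_wc_map_alt (wc_map : List (String × Int)) (metamap_map : List (String × String)) : List (String × Int) :=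
  let m : PySem.Dict String String := PySem.Dict.mk metamap_map
  let pairs : List (String × Int) := wc_map.filterMap (fun q => (m.get? q.1).map (fun n => (n, q.2)))
  let norms : PySem.Set String := PySem.Set.ofList (pairs.map (·.1))
  norms.map (fun n => (n, (pairs.filter (fun q => q.1 == n)).foldl (fun s q => s + q.2) 0))

-- ===== PRECONDITION & SPEC =====
def Spec_normalize_wc_map (wc_map : List (String × Int)) (metamap_map : List (String × String)) (out : List (String × Int)) : Prop := out = normalize_wc_map_alt wc_map metamap_map
instance (wc_map : List (String × Int)) (metamap_map : List (String × String)) (out : List (String × Int)) : Decidable (Spec_normalize_wc_map wc_map metamap_map out) := by unfold Spec_normalize_wc_map; infer_instance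

-- ===== CLAIM (what is proved, stated in full; the proofs are below) =====
def Claim_equal_normalize_wc_map : Prop := ∀ (wc_map : List (String × Int)) (metamap_map : List (String × String)), Dom_normalize_wc_map wc_map metamap_map → Spec_normalize_wc_map wc_map metamap_map (normalize_wc_map wc_map metamap_map)

-- ===== LEMMAS AND PROOFS =====

/-- A's loop body, applied to an already-translated (norm, count) pair. -/
def pvStep (new : PySem.Dict String Int) (p : String × Int) : PySem.Dict String Int :=
  if new.contains p.1 = false then new.insert p.1 p.2 else new.insert p.1 (new.getD p.1 0 + p.2)

/-- The translated pair list both programs effectively process. -/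
def pvPairs (m : PySem.Dict String String) (wc : List (String × Int)) : List (String × Int) :=
  wc.filterMap (fun q => (m.get? q.1).map (fun n => (n, q.2)))

/-- Total count for a norm in a pair list. -/
def pvSum (ps : List (String × Int)) (n : String) : Int :=
  ((ps.filter (fun q => q.1 == n)).map (·.2)).sum

lemma pvSum_append (ps : List (String × Int)) (q : String × Int) (n : String) :
    pvSum (ps ++ [q]) n = pvSum ps n + (if q.1 = n then q.2 else 0) := by
  simp [pvSum, List.filter_append]
  by_cases h : q.1 = n <;> simp [h]

lemma pvSum_of_not_mem (ps : List (String × Int)) (n : String) (h : n ∉ ps.map (·.1)) :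
    pvSum ps n = 0 := by
  have : ps.filter (fun q => q.1 == n) = [] := by
    rw [List.filter_eq_nil_iff]
    intro a ha hq
    exact h (List.mem_map.mpr ⟨a, ha, by simpa using hq⟩)
  simp [pvSum, this]

/-- A's fold over wc_map equals the same accumulation over the translated pairs. -/
lemma pvFold_eq (m : PySem.Dict String String) :
    ∀ (wc : List (String × Int)) (d : PySem.Dict String Int),
    wc.foldl (fun new q =>
      if m.contains q.1 = false then new
      else
        let norm := m.getD q.1 ""
        if new.contains norm = false then new.insert norm q.2
        else new.insert norm (new.getD norm 0 + q.2)) d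
    = (pvPairs m wc).foldl pvStep d := by
  intro wc
  induction wc with
  | nil => intro d; simp [pvPairs]
  | cons q wc ih =>
    intro d
    cases hg : m.get? q.1 with
    | none =>
      have hc : m.contains q.1 = false := by
        rw [PySem.Dict.contains_eq_isSome_get?, hg]; rfl
      simp [pvPairs, hg, hc, List.foldl_cons, ih]
    | some v =>
      have hc : m.contains q.1 = true := by
        rw [PySem.Dict.contains_eq_isSome_get?, hg]; rfl
      have hd : m.getD q.1 "" = v := PySem.Dict.getD_of_get?_eq_some m "" hg
      have hp : pvPairs m (q :: wc) = (v, q.2) :: pvPairs m wc := by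
        unfold pvPairs; rw [List.filterMap_cons, hg]; rfl
      have hb : (if m.contains q.1 = false then d
          else
            let norm := m.getD q.1 ""
            if d.contains norm = false then d.insert norm q.2
            else d.insert norm (d.getD norm 0 + q.2)) = pvStep d (v, q.2) := by
        simp [hc, hd, pvStep]
      rw [hp, List.foldl_cons, List.foldl_cons, ih, hb]

/-- The accumulated dict's items: distinct norms in first-appearance order, each with its total. -/
lemma pvAggr_items (ps : List (String × Int)) :
    (ps.foldl pvStep PySem.Dict.empty).items
      = (PySem.Set.ofList (ps.map (·.1))).map (fun n => (n, pvSum ps n)) := by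
  induction ps using List.reverseRecOn with
  | nil => rfl
  | append_singleton ps q ih =>
    rw [List.foldl_append, List.foldl_cons, List.foldl_nil]
    obtain ⟨d, hd⟩ : ∃ d, ps.foldl pvStep PySem.Dict.empty = d := ⟨_, rfl⟩
    rw [hd] at ih ⊢
    have hkeys : d.keys = PySem.Set.ofList (ps.map (·.1)) := by
      show d.items.map (·.1) = _
      rw [ih, List.map_map]
      simp only [Function.comp_def]
      exact List.map_id _
    have hnd : d.keys.Nodup := by rw [hkeys]; exact PySem.Set.nodup_ofList _
    by_cases hmem : q.1 ∈ PySem.Set.ofList (ps.map (·.1))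
    · -- norm already present: in-place overwrite with the increased total
      have hc : d.contains q.1 = true := by
        rw [PySem.Dict.contains_iff_mem_keys, hkeys]; exact hmem
      have hget : d.getD q.1 0 = pvSum ps q.1 := by
        refine PySem.Dict.getD_of_mem_items d ?_ hnd 0
        rw [ih]; exact List.mem_map.mpr ⟨q.1, hmem, rfl⟩
      have hstep : pvStep d q = d.insert q.1 (d.getD q.1 0 + q.2) := by
        simp [pvStep, hc]
      rw [hstep, PySem.Dict.items_insert_of_contains d _ hc, ih, List.map_map]
      have hset : PySem.Set.ofList ((ps ++ [q]).map (·.1))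
          = PySem.Set.ofList (ps.map (·.1)) := by
        rw [List.map_append, PySem.Set.ofList_append]
        simp only [List.map_cons, List.map_nil]
        rw [PySem.Set.update_cons, PySem.Set.update_nil, PySem.Set.add_of_mem hmem]
      rw [hset]
      apply List.map_congr_left
      intro n hn
      simp only [Function.comp_apply, hget, pvSum_append]
      by_cases h : n = q.1
      · subst h; simp
      · have hb2 : (n == q.1) = false := by simpa using h
        simp only [hb2, Bool.false_eq_true, if_false]
        rw [if_neg (fun hh => h hh.symm)]
        simp
    · -- new norm: appended at the end with its (first) count
      have hc : d.contains q.1 = false := by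
        rw [Bool.eq_false_iff]
        intro hcc
        exact hmem (by rw [← hkeys]; exact (PySem.Dict.contains_iff_mem_keys _ _).mp hcc)
      have hstep : pvStep d q = d.insert q.1 q.2 := by simp [pvStep, hc]
      rw [hstep, PySem.Dict.items_insert_of_not_contains d _ hc, ih]
      have hset : PySem.Set.ofList ((ps ++ [q]).map (·.1))
          = PySem.Set.ofList (ps.map (·.1)) ++ [q.1] := by
        rw [List.map_append, PySem.Set.ofList_append]
        simp only [List.map_cons, List.map_nil]
        rw [PySem.Set.update_cons, PySem.Set.update_nil, PySem.Set.add_of_not_mem hmem]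
      rw [hset, List.map_append]
      congr 1
      · apply List.map_congr_left
        intro n hn
        rw [pvSum_append]
        have : q.1 ≠ n := fun h => hmem (h ▸ hn)
        simp [this]
      · have h0 : pvSum ps q.1 = 0 :=
          pvSum_of_not_mem _ _ (fun h => hmem ((PySem.Set.mem_ofList _ _).mpr h))
        simp [pvSum_append, h0]

-- ===== VERDICT (by name: the statement is the Claim_ definition above) =====
theorem normalize_wc_map_spec : Claim_equal_normalize_wc_map := by
  intro wc mm _
  show normalize_wc_map wc mm = normalize_wc_map_alt wc mm
  show (wc.foldl (fun new q =>
      if (PySem.Dict.mk mm).contains q.1 = false then new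
      else
        let norm := (PySem.Dict.mk mm).getD q.1 ""
        if new.contains norm = false then new.insert norm q.2
        else new.insert norm (new.getD norm 0 + q.2)) PySem.Dict.empty).items
    = (PySem.Set.ofList ((pvPairs (PySem.Dict.mk mm) wc).map (·.1))).map
        (fun n => (n, ((pvPairs (PySem.Dict.mk mm) wc).filter (fun q => q.1 == n)).foldl
          (fun s q => s + q.2) 0))
  rw [pvFold_eq, pvAggr_items]
  apply List.map_congr_left
  intro n _
  simp [pvSum, PySem.List.foldl_add]
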